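-- pv_equiv track=rewrite | github.com/avulman/adversary-detection-as-code-lab | scripts/test_splunk_detections.py | insert_implicit_ands
-- ===== SOURCE A (Python) =====
-- def is_boolean_token(token: str) -> bool:
--     return token.upper() in {"AND", "OR"}
--
-- def is_operator_token(token: str) -> bool:
--     return token in {"=", "!="}
--
-- def starts_comparison(tokens: list[str], index: int) -> bool:
--     if index + 2 >= len(tokens):
--         return False
--
--     field = tokens[index]
--     operator = tokens[index + 1]
--     value = tokens[index + 2]
--
--     # field token cannot itself be a parenthesis or operator
--     if field in {"(", ")"} or is_boolean_token(field) or is_operator_token(field):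
--         return False
--
--     # operator must be one of the supported comparison tokens
--     if not is_operator_token(operator):
--         return False
--
--     # value token cannot be a parenthesis or boolean operator
--     if value in {"(", ")"} or is_boolean_token(value):
--         return False
--
--     return True
--
-- def insert_implicit_ands(tokens: list[str]) -> list[str]:
--     result = []
--     i = 0
--
--     while i < len(tokens):
--         # Copy complete comparison as a unit: field op value
--         if starts_comparison(tokens, i):
--             result.extend(tokens[i:i + 3])
--             i += 3
--
--             # insert implicit AND if the next token starts another comparison
--             # or opens a grouped comparison
--             if i < len(tokens):
--                 if tokens[i] == "(" or starts_comparison(tokens, i):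
--                     result.append("AND")
--             continue
--
--         token = tokens[i]
--         result.append(token)
--         i += 1
--
--         # insert implicit AND after a closing parenthesis if another grouped
--         # expression or comparison immediately follows
--         if token == ")" and i < len(tokens):
--             if tokens[i] == "(" or starts_comparison(tokens, i):
--                 result.append("AND")
--
--     return result
-- ===== SOURCE B (Python) =====
-- def is_boolean_token(token: str) -> bool:
--     return token.upper() in {"AND", "OR"}
--
-- def is_operator_token(token: str) -> bool:
--     return token in {"=", "!="}
--
-- def starts_comparison(tokens: list[str], index: int) -> bool:
--     if index + 2 >= len(tokens):
--         return False
--     field = tokens[index]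
--     operator = tokens[index + 1]
--     value = tokens[index + 2]
--     if field in {"(", ")"} or is_boolean_token(field) or is_operator_token(field):
--         return False
--     if not is_operator_token(operator):
--         return False
--     if value in {"(", ")"} or is_boolean_token(value):
--         return False
--     return True
--
-- def _units(tokens):
--     units = []
--     i = 0
--     while i < len(tokens):
--         if starts_comparison(tokens, i):
--             units.append(tokens[i:i + 3])
--             i += 3
--         else:
--             units.append([tokens[i]])
--             i += 1
--     return units
--
-- def _need_and(left, right):
--     return (len(left) == 3 or left == [")"]) and (len(right) == 3 or right == ["("])
--
-- def insert_implicit_ands(tokens: list[str]) -> list[str]: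
--     units = _units(tokens)
--     result = []
--     for k in range(len(units)):
--         result += units[k]
--         if k + 1 < len(units) and _need_and(units[k], units[k + 1]):
--             result.append("AND")
--     return result
-- ===== Notes on version B (the rewrite author's own statement) =====
-- stated objective: alternative
-- what changed: B replaces A's single inline-lookahead emit loop by a two-phase pipeline: first segment the tokens into a list of units (comparison triples or single tokens), then join consecutive units, inserting an AND exactly when the left unit is a comparison triple or a closing parenthesis and the right unit is a comparison triple or an opening parenthesis.
import Mathlib
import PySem

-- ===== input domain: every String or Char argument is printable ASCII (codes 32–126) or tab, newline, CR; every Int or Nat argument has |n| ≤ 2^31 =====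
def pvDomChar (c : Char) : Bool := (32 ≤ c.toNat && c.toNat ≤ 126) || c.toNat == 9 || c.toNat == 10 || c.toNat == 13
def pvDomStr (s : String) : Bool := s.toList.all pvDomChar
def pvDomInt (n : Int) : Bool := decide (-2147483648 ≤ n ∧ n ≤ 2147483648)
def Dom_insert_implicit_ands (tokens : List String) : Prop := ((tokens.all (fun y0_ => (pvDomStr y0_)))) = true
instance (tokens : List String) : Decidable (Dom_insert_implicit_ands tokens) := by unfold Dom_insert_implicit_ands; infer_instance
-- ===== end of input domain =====

-- ===== PORT A =====
-- B changes the decomposition: segment tokens into units first, then join units with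
-- explicit AND separators (objective: alternative decomposition; same cost).

-- shared helpers (identical in both Python files)
def isBooleanToken (token : String) : Bool :=
  PySem.Str.upper token == "AND" || PySem.Str.upper token == "OR"

def isOperatorToken (token : String) : Bool :=
  token == "=" || token == "!="

def startsComparison (tokens : List String) (index : Nat) : Bool :=
  if index + 2 ≥ tokens.length then false
  else
    let field := tokens.getD index ""
    let operator := tokens.getD (index + 1) ""
    let value := tokens.getD (index + 2) ""
    if field == "(" || field == ")" || isBooleanToken field || isOperatorToken field then false
    else if !(isOperatorToken operator) then false
    else if value == "(" || value == ")" || isBooleanToken value then false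
    else true

-- the while-loop of A, step for step (i, result are the loop state)
def insertLoopA (tokens : List String) (i : Nat) (result : List String) : List String :=
  if i < tokens.length then
    if startsComparison tokens i then
      let result := result ++ PySem.List.slice tokens (some (i : Int)) (some ((i : Int) + 3))
      let i' := i + 3
      let result :=
        if decide (i' < tokens.length) &&
            (tokens.getD i' "" == "(" || startsComparison tokens i') then
          result ++ ["AND"]
        else result
      insertLoopA tokens i' result
    else
      let token := tokens.getD i ""
      let result := result ++ [token]
      let i' := i + 1
      let result :=
        if token == ")" && decide (i' < tokens.length) &&
            (tokens.getD i' "" == "(" || startsComparison tokens i') then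
          result ++ ["AND"]
        else result
      insertLoopA tokens i' result
  else result
termination_by tokens.length - i

def insert_implicit_ands (tokens : List String) : List String :=
  insertLoopA tokens 0 []

-- ===== PORT B =====
-- B phase 1: the _units scan
def unitsB (tokens : List String) (i : Nat) : List (List String) :=
  if i < tokens.length then
    if startsComparison tokens i then
      PySem.List.slice tokens (some (i : Int)) (some ((i : Int) + 3)) :: unitsB tokens (i + 3)
    else
      [tokens.getD i ""] :: unitsB tokens (i + 1)
  else []
termination_by tokens.length - i

-- B's _need_and
def needAnd (left right : List String) : Bool :=
  (left.length == 3 || left == [")"]) && (right.length == 3 || right == ["("])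

-- B phase 2: the emit loop over units (peeking at the next unit)
def joinUnits : List (List String) → List String
  | [] => []
  | u :: rest =>
    u ++ (match rest with
          | [] => []
          | v :: _ => if needAnd u v then ["AND"] else []) ++ joinUnits rest

def insert_implicit_ands_alt (tokens : List String) : List String :=
  joinUnits (unitsB tokens 0)


-- ===== PRECONDITION & SPEC =====
def Spec_insert_implicit_ands (tokens : List String) (out : List String) : Prop := out = insert_implicit_ands_alt tokens
instance (tokens : List String) (out : List String) : Decidable (Spec_insert_implicit_ands tokens out) := by unfold Spec_insert_implicit_ands; infer_instance

-- ===== CLAIM (what is proved, stated in full; the proofs are below) =====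
def Claim_equal_insert_implicit_ands : Prop := ∀ (tokens : List String), Dom_insert_implicit_ands tokens → Spec_insert_implicit_ands tokens (insert_implicit_ands tokens)

-- ===== LEMMAS AND PROOFS =====
-- equation lemma for joinUnits (its defining clause, restated for rw)
lemma joinUnits_cons (u : List String) (rest : List (List String)) :
    joinUnits (u :: rest) =
      u ++ (match rest with
            | [] => []
            | v :: _ => if needAnd u v then ["AND"] else []) ++ joinUnits rest := rfl

-- a comparison unit has exactly three tokens
lemma slice_len_three (tokens : List String) (i : Nat)
    (h : startsComparison tokens i = true) :
    (PySem.List.slice tokens (some (i : Int)) (some ((i : Int) + 3))).length = 3 := by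
  have hlt : i + 2 < tokens.length := by
    by_contra hc
    simp [startsComparison, Nat.not_lt.mp hc] at h
  have : ((i : Int) + 3) = ((i : Int) + ((3 : Nat) : Int)) := by norm_num
  rw [this, PySem.List.slice_natCast_add]
  simp [List.length_take, List.length_drop]
  omega

-- the AND test A performs at a boundary equals B's right-hand unit test
lemma head_cond (tokens : List String) (i' : Nat) :
    (decide (i' < tokens.length) &&
      (tokens.getD i' "" == "(" || startsComparison tokens i')) =
    (match unitsB tokens i' with
     | [] => false
     | v :: _ => (v.length == 3 || v == ["("])) := by
  rw [unitsB]
  by_cases h : i' < tokens.length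
  · simp only [if_pos h]
    by_cases hs : startsComparison tokens i' = true
    · simp [hs, h, slice_len_three tokens i' hs]
    · simp only [Bool.not_eq_true] at hs
      simp [hs, h]
  · simp [h]

-- the loop of A produces exactly B's joined units
lemma loopA_eq (tokens : List String) (i : Nat) (result : List String) :
    insertLoopA tokens i result = result ++ joinUnits (unitsB tokens i) := by
  rw [insertLoopA]
  by_cases h : i < tokens.length
  · simp only [if_pos h]
    by_cases hs : startsComparison tokens i = true
    · simp only [if_pos hs]
      rw [loopA_eq]
      have hu0 : unitsB tokens i =
          PySem.List.slice tokens (some (i : Int)) (some ((i : Int) + 3)) :: unitsB tokens (i + 3) := by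
        rw [unitsB]; simp [h, hs]
      rw [hu0, joinUnits_cons]
      rw [head_cond]
      cases hu : unitsB tokens (i + 3) with
      | nil => simp
      | cons v rest =>
        simp only [needAnd, slice_len_three tokens i hs]
        by_cases hv : (v.length == 3 || v == ["("]) = true
        · simp [hv]
        · simp only [Bool.not_eq_true] at hv
          simp [hv]
    · simp only [Bool.not_eq_true] at hs
      simp only [hs, if_neg (Bool.false_ne_true)]
      rw [loopA_eq]
      have hu0 : unitsB tokens i = [tokens.getD i ""] :: unitsB tokens (i + 1) := by
        rw [unitsB]; simp [h, hs]
      rw [hu0, joinUnits_cons]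
      rw [Bool.and_assoc, head_cond]
      cases hu : unitsB tokens (i + 1) with
      | nil => simp
      | cons v rest =>
        simp only [needAnd]
        split_ifs with h1 h2 <;> simp_all
  · simp only [if_neg h]
    conv_rhs => rw [unitsB, if_neg h]
    simp [joinUnits]
termination_by tokens.length - i

-- ===== VERDICT (by name: the statement is the Claim_ definition above) =====
theorem insert_implicit_ands_spec : Claim_equal_insert_implicit_ands := by
  intro tokens _
  unfold Spec_insert_implicit_ands insert_implicit_ands insert_implicit_ands_alt
  simpa using loopA_eq tokens 0 []
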